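-- pv_equiv track=rewrite | github.com/GracefulMan/LeetCodeProblem | python/401_binary_watch.py | get_time_list
-- ===== SOURCE A (Python) =====
-- def get_time_list(array, nums, hour=True):
--     if nums == 0 : return [0]
--     max_num = 12 if hour else 59
--     import itertools
--     tmp_list = list(itertools.combinations(array, nums))
--     res = []
--     for i in range(len(tmp_list)):
--         tmp_sum = 0
--         for j in range(nums):
--             tmp_sum += tmp_list[i][j]
--         if tmp_sum < max_num:
--             res.append(tmp_sum)
--     return res
-- ===== SOURCE B (Python) =====
-- def get_time_list(array, nums, hour=True):
--     # Recursive backtracking over the list suffix instead of itertools.combinations: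
--     # include-or-skip the head, threading the running sum; emission order matches
--     # itertools' lexicographic-by-index order.
--     if nums == 0:
--         return [0]
--     max_num = 12 if hour else 59
--
--     def bt(arr, k, s):
--         if k == 0:
--             return [s] if s < max_num else []
--         if not arr:
--             return []
--         return bt(arr[1:], k - 1, s + arr[0]) + bt(arr[1:], k, s)
--
--     return bt(array, nums, 0)
-- ===== Notes on version B (the rewrite author's own statement) =====
-- stated objective: alternative
-- what changed: Replaced itertools.combinations materialisation plus a nested index summing loop with a recursive include-or-skip backtracking over the list suffix that threads the running sum and emits sums directly in the same order.
import Mathlib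
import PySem

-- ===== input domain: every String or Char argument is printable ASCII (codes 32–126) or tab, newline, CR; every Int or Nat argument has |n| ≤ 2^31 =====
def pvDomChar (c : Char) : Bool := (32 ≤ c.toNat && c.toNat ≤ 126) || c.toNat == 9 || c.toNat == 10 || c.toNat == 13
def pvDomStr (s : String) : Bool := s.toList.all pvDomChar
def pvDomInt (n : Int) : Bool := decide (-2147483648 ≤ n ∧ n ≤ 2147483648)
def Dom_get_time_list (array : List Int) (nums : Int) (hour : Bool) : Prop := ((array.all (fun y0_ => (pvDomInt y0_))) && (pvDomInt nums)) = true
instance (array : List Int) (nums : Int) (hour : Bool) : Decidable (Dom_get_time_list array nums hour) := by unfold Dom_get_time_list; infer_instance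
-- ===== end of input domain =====

-- B replaces the itertools-combinations materialisation with include-or-skip backtracking
-- threading a running sum (alternative decomposition; same emission order).

-- ===== PORT A =====
-- itertools.combinations(array, k) in its lexicographic-by-index order
def combosA : List Int → Nat → List (List Int)
  | _, 0 => [[]]
  | [], _ + 1 => []
  | x :: rest, k + 1 => (combosA rest k).map (fun c => x :: c) ++ combosA rest (k + 1)

def get_time_list (array : List Int) (nums : Int) (hour : Bool) : List Int :=
  if nums == 0 then [0]
  else
    let max_num : Int := if hour then 12 else 59
    let tmp_list := combosA array nums.toNat
    -- inner loop: tmp_sum += tmp_list[i][j] for j in range(nums); pyGetD is exact here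
    -- since every combination has length nums on inputs where A returns (nums ≥ 0)
    tmp_list.foldl (fun res c =>
      let tmp_sum := (PySem.List.pyRange 0 nums 1).foldl
        (fun s j => s + PySem.List.pyGetD c j 0) 0
      if tmp_sum < max_num then res ++ [tmp_sum] else res) []

-- ===== PORT B =====
def btAlt (max_num : Int) : List Int → Int → Int → List Int
  | l, k, s =>
    if k == 0 then (if s < max_num then [s] else [])
    else
      match l with
      | [] => []
      | x :: rest => btAlt max_num rest (k - 1) (s + x) ++ btAlt max_num rest k s

def get_time_list_alt (array : List Int) (nums : Int) (hour : Bool) : List Int :=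
  if nums == 0 then [0]
  else btAlt (if hour then 12 else 59) array nums 0

-- ===== PRECONDITION & SPEC =====
-- Pre_ excludes nums < 0, on which A raises ValueError (itertools.combinations requires r ≥ 0).
def Pre_get_time_list (array : List Int) (nums : Int) (hour : Bool) : Prop := 0 ≤ nums
instance (array : List Int) (nums : Int) (hour : Bool) : Decidable (Pre_get_time_list array nums hour) := by unfold Pre_get_time_list; infer_instance
def pvWitness_get_time_list : List Int × Int × Bool := ([1, 2, 8], 2, true)

def Spec_get_time_list (array : List Int) (nums : Int) (hour : Bool) (out : List Int) : Prop := out = get_time_list_alt array nums hour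
instance (array : List Int) (nums : Int) (hour : Bool) (out : List Int) : Decidable (Spec_get_time_list array nums hour out) := by unfold Spec_get_time_list; infer_instance

-- ===== CLAIM (what is proved, stated in full; the proofs are below) =====
def Claim_equal_get_time_list : Prop := ∀ (array : List Int) (nums : Int) (hour : Bool), Dom_get_time_list array nums hour → Pre_get_time_list array nums hour → Spec_get_time_list array nums hour (get_time_list array nums hour)

-- ===== LEMMAS AND PROOFS =====

-- every element of combosA l k has length k
theorem combosA_length : ∀ (l : List Int) (k : Nat) (c : List Int), c ∈ combosA l k → c.length = k := by
  intro l
  induction l with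
  | nil => intro k c hc; cases k with
    | zero => simp [combosA] at hc; simp [hc]
    | succ k => simp [combosA] at hc
  | cons x rest ih =>
    intro k c hc
    cases k with
    | zero => simp [combosA] at hc; simp [hc]
    | succ k =>
      simp only [combosA, List.mem_append, List.mem_map] at hc
      rcases hc with ⟨d, hd, rfl⟩ | hc
      · simp [ih k d hd]
      · exact ih (k + 1) c hc

-- A's inner index loop computes the list sum
theorem innerSum (c : List Int) :
    (PySem.List.pyRange 0 (c.length : Int) 1).foldl (fun s j => s + PySem.List.pyGetD c j 0) 0 = c.sum := by
  rw [PySem.List.foldl_pyRange_zero_pyGetD' c 0 (fun s v => s + v) 0]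
  induction c using List.reverseRecOn with
  | nil => simp
  | append_singleton l a ih => simp [ih]

-- characterisation of B's backtracking
theorem btAlt_char (m : Int) : ∀ (l : List Int) (k : Nat) (s : Int),
    btAlt m l (k : Int) s = ((combosA l k).map (fun c => s + c.sum)).filter (fun t => decide (t < m)) := by
  intro l
  induction l with
  | nil =>
    intro k s
    cases k with
    | zero =>
      simp only [btAlt, combosA, Nat.cast_zero]
      by_cases hs : s < m <;> simp [hs, List.filter]
    | succ k =>
      rw [btAlt]
      have h : (((k + 1 : Nat) : Int) == 0) = false := by
        rw [beq_eq_false_iff_ne]; exact_mod_cast Nat.succ_ne_zero k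
      simp only [h, Bool.false_eq_true, if_false, combosA, List.map_nil, List.filter_nil]
  | cons x rest ih =>
    intro k s
    cases k with
    | zero =>
      simp only [btAlt, combosA, Nat.cast_zero]
      by_cases hs : s < m <;> simp [hs, List.filter]
    | succ k =>
      rw [btAlt]
      have h : (((k + 1 : Nat) : Int) == 0) = false := by
        rw [beq_eq_false_iff_ne]; exact_mod_cast Nat.succ_ne_zero k
      simp only [h, Bool.false_eq_true, if_false]
      have hk1 : ((k + 1 : Nat) : Int) - 1 = (k : Int) := by push_cast; ring
      rw [hk1, ih k (s + x), ih (k + 1) s]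
      simp only [combosA, List.map_append, List.filter_append, List.map_map]
      congr 2
      apply List.map_congr_left
      intro c _
      simp only [Function.comp_apply, List.sum_cons]
      ring

-- A's accumulation loop as filter-of-map
theorem foldA (m : Int) : ∀ (L : List (List Int)) (acc : List Int),
    L.foldl (fun res c => if c.sum < m then res ++ [c.sum] else res) acc
      = acc ++ (L.map List.sum).filter (fun t => decide (t < m)) := by
  intro L
  induction L with
  | nil => intro acc; simp
  | cons c L ih =>
    intro acc
    simp only [List.foldl_cons, List.map_cons, List.filter_cons]
    by_cases hc : c.sum < m <;> simp [hc, ih]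

theorem get_time_list_spec_aux (array : List Int) (nums : Int) (hour : Bool)
    (hpre : 0 ≤ nums) : get_time_list array nums hour = get_time_list_alt array nums hour := by
  by_cases h0 : nums = 0
  · simp [get_time_list, get_time_list_alt, h0]
  · have hb : (nums == 0) = false := by simp [h0]
    obtain ⟨n, rfl⟩ : ∃ n : Nat, nums = (n : Int) := ⟨nums.toNat, (Int.toNat_of_nonneg hpre).symm⟩
    unfold get_time_list get_time_list_alt
    simp only [hb, Bool.false_eq_true, if_false, Int.toNat_natCast]
    rw [btAlt_char]
    rw [PySem.List.foldl_congr_mem (g := fun res c =>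
        if c.sum < (if hour then (12:Int) else 59) then res ++ [c.sum] else res)]
    · rw [foldA]
      simp
    · intro res c hc
      have hl : c.length = n := combosA_length array n c hc
      have : (PySem.List.pyRange 0 (n : Int) 1).foldl (fun s j => s + PySem.List.pyGetD c j 0) 0 = c.sum := by
        rw [← hl] at *
        exact_mod_cast innerSum c
      simp only [this]

-- ===== VERDICT (by name: the statement is the Claim_ definition above) =====
theorem get_time_list_spec : Claim_equal_get_time_list := by
  intro array nums hour _ hpre
  unfold Spec_get_time_list
  exact get_time_list_spec_aux array nums hour hpre
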